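-- pv_equiv track=rewrite | github.com/simonw/datasette-showboat | datasette_showboat/__init__.py | make_fence
-- ===== SOURCE A (Python) =====
-- def make_fence(content):
--     """Return a backtick fence string that doesn't conflict with content."""
--     max_run = 0
--     current_run = 0
--     for char in content:
--         if char == "`":
--             current_run += 1
--             max_run = max(max_run, current_run)
--         else:
--             current_run = 0
--     return "`" * max(3, max_run + 1)
-- ===== SOURCE B (Python) =====
-- def make_fence(content):
--     """Return a backtick fence string that doesn't conflict with content."""
--     runs = []
--     i = 0
--     n = len(content)
--     while i < n:
--         if content[i] == "`":
--             j = i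
--             while j < n and content[j] == "`":
--                 j += 1
--             runs.append(j - i)
--             i = j
--         else:
--             i += 1
--     max_run = max(runs, default=0)
--     return "`" * max(3, max_run + 1)
-- ===== Notes on version B (the rewrite author's own statement) =====
-- stated objective: alternative
-- what changed: Replaces the stateful current_run/max_run single pass with a build-then-reduce decomposition: materialise the list of maximal backtick-run lengths (jumping past each run) and take max(runs, default=0).
import Mathlib
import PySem

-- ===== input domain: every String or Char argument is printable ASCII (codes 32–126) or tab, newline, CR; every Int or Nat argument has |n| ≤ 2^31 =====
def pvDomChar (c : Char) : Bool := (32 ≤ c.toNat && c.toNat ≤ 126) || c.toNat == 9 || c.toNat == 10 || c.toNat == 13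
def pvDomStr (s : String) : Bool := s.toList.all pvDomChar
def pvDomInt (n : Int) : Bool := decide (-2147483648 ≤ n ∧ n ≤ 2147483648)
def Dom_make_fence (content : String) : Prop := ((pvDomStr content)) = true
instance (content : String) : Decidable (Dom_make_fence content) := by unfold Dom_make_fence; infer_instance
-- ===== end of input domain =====

-- B replaces A's stateful current_run/max_run scan by materialising the list of
-- maximal backtick-run lengths and reducing with max (alternative decomposition, same cost).


-- ===== PORT A =====
-- A's loop: state (max_run, current_run), folded over the characters.
def make_fence (content : String) : String :=
  let st := content.toList.foldl
    (fun (p : Nat × Nat) char =>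
      if char = '`' then (max p.1 (p.2 + 1), p.2 + 1) else (p.1, 0))
    (0, 0)
  String.mk (List.replicate (max 3 (st.1 + 1)) '`')

-- ===== PORT B =====
-- length of the leading backtick run (B's inner `while j < n and content[j] == '`'` loop)
def leadRun : List Char → Nat
  | '`' :: xs => leadRun xs + 1
  | _ => 0

-- the rest of the string after the leading backtick run
def dropRun : List Char → List Char
  | '`' :: xs => dropRun xs
  | l => l

theorem dropRun_length_le (l : List Char) : (dropRun l).length ≤ l.length := by
  induction l with
  | nil => simp [dropRun]
  | cons c cs ih =>
    by_cases h : c = '`'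
    · subst h
      calc (dropRun ('`' :: cs)).length = (dropRun cs).length := rfl
        _ ≤ cs.length := ih
        _ ≤ ('`' :: cs).length := by simp
    · have hd : dropRun (c :: cs) = c :: cs := by cases cs <;> simp [dropRun, h]
      simp [hd]

-- B's outer loop: collect the lengths of all maximal backtick runs.
def btRuns : List Char → List Nat
  | [] => []
  | c :: cs =>
    if c = '`' then (leadRun cs + 1) :: btRuns (dropRun cs) else btRuns cs
termination_by l => l.length
decreasing_by
  · have := dropRun_length_le cs; simp; omega
  · simp

def make_fence_alt (content : String) : String :=
  let runs := btRuns content.toList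
  let max_run := runs.foldr (fun a b => max a b) 0
  String.mk (List.replicate (max 3 (max_run + 1)) '`')

-- ===== PRECONDITION & SPEC =====
def Spec_make_fence (content : String) (out : String) : Prop := out = make_fence_alt content
instance (content : String) (out : String) : Decidable (Spec_make_fence content out) := by unfold Spec_make_fence; infer_instance

-- ===== CLAIM (what is proved, stated in full; the proofs are below) =====
def Claim_equal_make_fence : Prop := ∀ (content : String), Dom_make_fence content → Spec_make_fence content (make_fence content)

-- ===== LEMMAS AND PROOFS =====
def maxR (l : List Char) : Nat := (btRuns l).foldr (fun a b => max a b) 0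

theorem leadRun_cons_bt (xs : List Char) : leadRun ('`' :: xs) = leadRun xs + 1 := rfl

theorem leadRun_cons_ne {c : Char} (h : c ≠ '`') (xs : List Char) : leadRun (c :: xs) = 0 := by
  cases xs <;> simp [leadRun, h]

theorem dropRun_cons_bt (xs : List Char) : dropRun ('`' :: xs) = dropRun xs := rfl

theorem dropRun_cons_ne {c : Char} (h : c ≠ '`') (xs : List Char) : dropRun (c :: xs) = c :: xs := by
  cases xs <;> simp [dropRun, h]

theorem btRuns_cons_ne {c : Char} (h : c ≠ '`') (xs : List Char) : btRuns (c :: xs) = btRuns xs := by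
  rw [btRuns]; simp [h]

theorem maxR_split (l : List Char) : maxR l = max (leadRun l) (maxR (dropRun l)) := by
  cases l with
  | nil => simp [maxR, btRuns, leadRun, dropRun]
  | cons c cs =>
    by_cases h : c = '`'
    · subst h
      simp only [maxR, leadRun_cons_bt, dropRun_cons_bt]
      rw [btRuns]
      simp
    · rw [maxR, btRuns_cons_ne h, leadRun_cons_ne h, dropRun_cons_ne h, maxR, btRuns_cons_ne h]
      omega

theorem key (l : List Char) : ∀ m c : Nat, c ≤ m →
    (l.foldl (fun (p : Nat × Nat) char =>
      if char = '`' then (max p.1 (p.2 + 1), p.2 + 1) else (p.1, 0)) (m, c)).1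
    = max m (max (c + leadRun l) (maxR (dropRun l))) := by
  induction l with
  | nil =>
    intro m c hcm
    simp [leadRun, dropRun, maxR, btRuns]
    omega
  | cons x xs ih =>
    intro m c hcm
    by_cases h : x = '`'
    · subst h
      simp only [List.foldl_cons, if_true]
      rw [ih (max m (c + 1)) (c + 1) (by omega)]
      rw [leadRun_cons_bt, dropRun_cons_bt]
      omega
    · simp only [List.foldl_cons, if_neg h]
      rw [ih m 0 (by omega)]
      rw [leadRun_cons_ne h, dropRun_cons_ne h]
      have h1 : maxR (x :: xs) = maxR xs := by rw [maxR, btRuns_cons_ne h, maxR]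
      have h2 := maxR_split xs
      omega

-- ===== VERDICT (by name: the statement is the Claim_ definition above) =====
theorem make_fence_spec : Claim_equal_make_fence := by
  intro content _
  unfold Spec_make_fence make_fence make_fence_alt
  have hk := key content.toList 0 0 (le_refl 0)
  have hval : max 0 (max (0 + leadRun content.toList) (maxR (dropRun content.toList)))
      = (btRuns content.toList).foldr (fun a b => max a b) 0 := by
    change _ = maxR content.toList
    have hs := maxR_split content.toList
    omega
  simp only [hk, hval]
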